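-- pv_equiv track=rewrite | github.com/Mankvis/mk-crawlers | anjuke/slide.py | generate_track
-- ===== SOURCE A (Python) =====
-- def generate_track(distance) -> str:
--     # 生成轨迹
--     all_track = ['26,12,1', '26,13,78', '27,13,166', '28,13,174', '29,13,191', '30,13,207', '31,13,223', '32,13,230', '33,13,246', '34,13,262', '35,13,279', '36,13,286', '37,13,303', '38,13,327', '39,13,334', '40,13,342', '41,13,374', '42,13,391', '43,13,414', '44,13,422', '45,13,438', '46,13,454', '48,13,470', '49,13,495', '50,13,519', '51,13,535', '52,13,542', '53,13,567', '54,13,583', '55,13,619', '56,13,622', '57,13,638', '58,13,663', '59,13,679', '60,13,694', '61,13,711', '62,13,727',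
--                  '63,13,735', '63,14,742', '64,15,750', '65,15,774', '66,15,798', '67,15,807', '68,15,822', '69,15,846', '70,15,862', '71,15,870', '72,15,894', '73,15,910', '74,15,926', '75,15,951', '76,15,958', '77,15,974', '79,15,998', '80,15,1023', '81,15,1054', '82,15,1086', '83,15,1094', '84,15,1126', '85,16,1134', '86,16,1166', '87,16,1175', '88,17,1190', '89,17,1214', '90,17,1222', '91,17,1238', '92,17,1263', '94,18,1279', '95,18,1318', '96,18,1336', '97,19,1342', '98,19,1358',
--                  '99,19,1374', '100,19,1390', '101,19,1399', '102,19,1414', '103,19,1446', '104,19,1462', '105,19,1470', '106,19,1487', '107,19,1510', '108,19,1518', '109,19,1526', '110,19,1542', '111,19,1558', '112,19,1574', '113,19,1590', '114,19,1607', '115,20,1630', '116,20,1654', '117,20,1662', '118,20,1679', '119,20,1687', '120,20,1694', '121,20,1703', '122,20,1726', '123,20,1734', '124,20,1758', '125,20,1774', '126,20,1790', '127,20,1814', '128,20,1822', '129,20,1838', '131,20,1854',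
--                  '132,20,1870', '133,20,1886', '134,20,1894', '135,20,1902', '136,20,1934', '137,20,1982', '138,20,2006', '139,20,2015', '140,20,2030', '141,20,2047', '142,20,2054', '143,20,2062', '144,20,2078', '145,20,2086', '146,20,2102', '147,20,2126', '148,20,2134', '149,20,2158', '150,19,2174', '151,19,2198', '152,19,2215', '153,19,2222', '154,19,2239', '157,18,2254', '158,18,2278', '160,17,2296', '161,17,2310', '163,17,2326', '164,17,2342', '166,17,2350', '167,17,2358', '168,17,2367',
--                  '169,17,2374', '171,17,2383', '171,16,2390', '173,15,2422', '174,15,2471', '175,15,2486', '176,15,2502', '177,15,2510', '178,15,2518', '178,14,2526', '179,14,2534', '180,14,2550', '181,14,2574', '182,14,2590', '183,14,2598', '184,14,2614', '185,14,2622', '186,14,2630', '187,14,2639', '188,14,2646', '190,14,2662', '191,14,2678', '192,14,2686', '193,14,2694', '194,14,2710', '195,14,2734', '197,14,2750', '198,14,2766', '199,14,2776', '200,14,2782', '201,14,2790', '202,14,2798',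
--                  '204,14,2814', '205,14,2838', '206,14,2854', '207,14,2878', '208,14,2910', '209,14,2934', '211,14,2951', '212,14,2966', '213,14,2990', '214,14,3014', '215,14,3022', '216,14,3055', '217,14,3078', '218,14,3110', '219,14,3120', '220,14,3142', '221,14,3174', '222,14,3191', '223,14,3199', '224,14,3214', '225,14,3238', '226,14,3263', '227,14,3271', '228,14,3280', '229,14,3294', '230,14,3319', '231,14,3334', '232,14,3358', '233,14,3422', '234,14,3446', '235,14,3470', '236,14,3486',
--                  '237,14,3518', '238,14,3567', '239,14,3574', '240,14,3638', '241,14,3662', '242,14,3702', '243,14,3718', '244,14,3766', '245,14,3807', '246,14,3830', '247,14,3854', '247,14,4151']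
--     now_track = []
--     for track in all_track:
--         if distance + 26 < int(track.split(',')[0]):
--             break
--         else:
--             now_track.append(track)
--     return now_track
-- ===== SOURCE B (Python) =====
-- import bisect
--
-- _track_points = [(26, 12, 1), (26, 13, 78), (27, 13, 166), (28, 13, 174), (29, 13, 191), (30, 13, 207), (31, 13, 223), (32, 13, 230), (33, 13, 246), (34, 13, 262), (35, 13, 279), (36, 13, 286), (37, 13, 303), (38, 13, 327), (39, 13, 334), (40, 13, 342), (41, 13, 374), (42, 13, 391), (43, 13, 414), (44, 13, 422), (45, 13, 438), (46, 13, 454), (48, 13, 470), (49, 13, 495), (50, 13, 519), (51, 13, 535), (52, 13, 542), (53, 13, 567), (54, 13, 583), (55, 13, 619), (56, 13, 622), (57, 13, 638), (58, 13, 663), (59, 13, 679), (60, 13, 694), (61, 13, 711), (62, 13, 727), (63, 13, 735), (63, 14, 742), (64, 15, 750), (65, 15, 774), (66, 15, 798), (67, 15, 807), (68, 15, 822), (69, 15, 846), (70, 15, 862), (71, 15, 870), (72, 15, 894), (73, 15, 910), (74, 15, 926), (75, 15, 951), (76, 15, 958), (77, 15, 974), (79, 15, 998), (80, 15, 1023),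 (81, 15, 1054), (82, 15, 1086), (83, 15, 1094), (84, 15, 1126), (85, 16, 1134), (86, 16, 1166), (87, 16, 1175), (88, 17, 1190), (89, 17, 1214), (90, 17, 1222), (91, 17, 1238), (92, 17, 1263), (94, 18, 1279), (95, 18, 1318), (96, 18, 1336), (97, 19, 1342), (98, 19, 1358), (99, 19, 1374), (100, 19, 1390), (101, 19, 1399), (102, 19, 1414), (103, 19, 1446), (104, 19, 1462), (105, 19, 1470), (106, 19, 1487), (107, 19, 1510), (108, 19, 1518), (109, 19, 1526), (110, 19, 1542), (111, 19, 1558), (112, 19, 1574), (113, 19, 1590), (114, 19, 1607), (115, 20, 1630), (116, 20, 1654), (117, 20, 1662), (118, 20, 1679), (119, 20, 1687), (120, 20, 1694), (121, 20, 1703), (122, 20, 1726), (123, 20, 1734), (124, 20, 1758), (125, 20, 1774), (126, 20, 1790), (127, 20, 1814), (128, 20, 1822), (129, 20, 1838), (131, 20, 1854), (132, 20, 1870), (133, 20, 1886), (134, 20, 1894), (135, 20, 1902), (136, 20, 1934), (137, 20, 1982), (138, 20, 2006), (139, 20, 2015), (140, 20, 2030), (141, 20, 2047), (142, 20, 2054),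 (143, 20, 2062), (144, 20, 2078), (145, 20, 2086), (146, 20, 2102), (147, 20, 2126), (148, 20, 2134), (149, 20, 2158), (150, 19, 2174), (151, 19, 2198), (152, 19, 2215), (153, 19, 2222), (154, 19, 2239), (157, 18, 2254), (158, 18, 2278), (160, 17, 2296), (161, 17, 2310), (163, 17, 2326), (164, 17, 2342), (166, 17, 2350), (167, 17, 2358), (168, 17, 2367), (169, 17, 2374), (171, 17, 2383), (171, 16, 2390), (173, 15, 2422), (174, 15, 2471), (175, 15, 2486), (176, 15, 2502), (177, 15, 2510), (178, 15, 2518), (178, 14, 2526), (179, 14, 2534), (180, 14, 2550), (181, 14, 2574), (182, 14, 2590), (183, 14, 2598), (184, 14, 2614), (185, 14, 2622), (186, 14, 2630), (187, 14, 2639), (188, 14, 2646), (190, 14, 2662), (191, 14, 2678), (192, 14, 2686), (193, 14, 2694), (194, 14, 2710), (195, 14, 2734), (197, 14, 2750), (198, 14, 2766), (199, 14, 2776), (200, 14, 2782), (201, 14, 2790), (202, 14, 2798), (204, 14, 2814), (205, 14, 2838), (206, 14, 2854), (207, 14, 2878), (208, 14, 2910), (209, 14, 2934), (211, 14, 2951),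 (212, 14, 2966), (213, 14, 2990), (214, 14, 3014), (215, 14, 3022), (216, 14, 3055), (217, 14, 3078), (218, 14, 3110), (219, 14, 3120), (220, 14, 3142), (221, 14, 3174), (222, 14, 3191), (223, 14, 3199), (224, 14, 3214), (225, 14, 3238), (226, 14, 3263), (227, 14, 3271), (228, 14, 3280), (229, 14, 3294), (230, 14, 3319), (231, 14, 3334), (232, 14, 3358), (233, 14, 3422), (234, 14, 3446), (235, 14, 3470), (236, 14, 3486), (237, 14, 3518), (238, 14, 3567), (239, 14, 3574), (240, 14, 3638), (241, 14, 3662), (242, 14, 3702), (243, 14, 3718), (244, 14, 3766), (245, 14, 3807), (246, 14, 3830), (247, 14, 3854), (247, 14, 4151)]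
--
-- _firsts = [p[0] for p in _track_points]
--
--
-- def generate_track(distance) -> str:
--     # numeric point table + binary search; strings are rendered on demand
--     idx = bisect.bisect_right(_firsts, distance + 26)
--     return [','.join(map(str, p)) for p in _track_points[:idx]]
-- ===== Notes on version B (the rewrite author's own statement) =====
-- stated objective: alternative
-- what changed: Replaces A's per-call linear scan that re-parses each track string and breaks on the threshold with a numeric point table: a precomputed list of integer first coordinates is binary-searched with bisect_right for the cutoff index, and the returned strings are rendered from the integer triples.
import Mathlib
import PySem

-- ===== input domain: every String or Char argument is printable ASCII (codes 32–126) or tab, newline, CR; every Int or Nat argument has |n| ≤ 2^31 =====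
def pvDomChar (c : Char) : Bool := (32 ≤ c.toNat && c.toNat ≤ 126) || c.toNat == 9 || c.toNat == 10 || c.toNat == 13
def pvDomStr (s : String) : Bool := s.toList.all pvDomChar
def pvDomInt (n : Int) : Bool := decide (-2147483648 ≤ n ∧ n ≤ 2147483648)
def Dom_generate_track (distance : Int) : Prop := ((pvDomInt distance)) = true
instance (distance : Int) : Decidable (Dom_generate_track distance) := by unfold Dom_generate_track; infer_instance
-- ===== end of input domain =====

-- B replaces A's linear parse-and-break scan over string literals with a numeric point
-- table: bisect_right over the precomputed first coordinates picks the cutoff, and the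
-- returned strings are rendered from the integer triples (objective: alternative algorithm).

-- ===== PORT A =====
-- the fixed literal track list of A
def pvAllTrack : List String := ["26,12,1", "26,13,78", "27,13,166", "28,13,174", "29,13,191", "30,13,207", "31,13,223", "32,13,230", "33,13,246", "34,13,262", "35,13,279", "36,13,286", "37,13,303", "38,13,327", "39,13,334", "40,13,342", "41,13,374", "42,13,391", "43,13,414", "44,13,422", "45,13,438", "46,13,454", "48,13,470", "49,13,495", "50,13,519", "51,13,535", "52,13,542", "53,13,567", "54,13,583", "55,13,619", "56,13,622", "57,13,638", "58,13,663", "59,13,679", "60,13,694", "61,13,711", "62,13,727", "63,13,735", "63,14,742", "64,15,750", "65,15,774", "66,15,798", "67,15,807", "68,15,822", "69,15,846", "70,15,862", "71,15,870", "72,15,894", "73,15,910", "74,15,926", "75,15,951", "76,15,958", "77,15,974", "79,15,998", "80,15,1023", "81,15,1054", "82,15,1086", "83,15,1094", "84,15,1126", "85,16,1134", "86,16,1166", "87,16,1175", "88,17,1190", "89,17,1214", "90,17,1222", "91,17,1238", "92,17,1263", "94,18,1279", "95,18,1318", "96,18,1336", "97,19,1342", "98,19,1358", "99,19,1374", "100,19,1390",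 "101,19,1399", "102,19,1414", "103,19,1446", "104,19,1462", "105,19,1470", "106,19,1487", "107,19,1510", "108,19,1518", "109,19,1526", "110,19,1542", "111,19,1558", "112,19,1574", "113,19,1590", "114,19,1607", "115,20,1630", "116,20,1654", "117,20,1662", "118,20,1679", "119,20,1687", "120,20,1694", "121,20,1703", "122,20,1726", "123,20,1734", "124,20,1758", "125,20,1774", "126,20,1790", "127,20,1814", "128,20,1822", "129,20,1838", "131,20,1854", "132,20,1870", "133,20,1886", "134,20,1894", "135,20,1902", "136,20,1934", "137,20,1982", "138,20,2006", "139,20,2015", "140,20,2030", "141,20,2047", "142,20,2054", "143,20,2062", "144,20,2078", "145,20,2086", "146,20,2102", "147,20,2126", "148,20,2134", "149,20,2158", "150,19,2174", "151,19,2198", "152,19,2215", "153,19,2222", "154,19,2239", "157,18,2254", "158,18,2278", "160,17,2296", "161,17,2310", "163,17,2326", "164,17,2342", "166,17,2350", "167,17,2358", "168,17,2367", "169,17,2374", "171,17,2383", "171,16,2390", "173,15,2422", "174,15,2471", "175,15,2486", "176,15,2502", "177,15,2510", "178,15,2518", "178,14,2526", "179,14,2534", "180,14,2550", "181,14,2574",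 "182,14,2590", "183,14,2598", "184,14,2614", "185,14,2622", "186,14,2630", "187,14,2639", "188,14,2646", "190,14,2662", "191,14,2678", "192,14,2686", "193,14,2694", "194,14,2710", "195,14,2734", "197,14,2750", "198,14,2766", "199,14,2776", "200,14,2782", "201,14,2790", "202,14,2798", "204,14,2814", "205,14,2838", "206,14,2854", "207,14,2878", "208,14,2910", "209,14,2934", "211,14,2951", "212,14,2966", "213,14,2990", "214,14,3014", "215,14,3022", "216,14,3055", "217,14,3078", "218,14,3110", "219,14,3120", "220,14,3142", "221,14,3174", "222,14,3191", "223,14,3199", "224,14,3214", "225,14,3238", "226,14,3263", "227,14,3271", "228,14,3280", "229,14,3294", "230,14,3319", "231,14,3334", "232,14,3358", "233,14,3422", "234,14,3446", "235,14,3470", "236,14,3486", "237,14,3518", "238,14,3567", "239,14,3574", "240,14,3638", "241,14,3662", "242,14,3702", "243,14,3718", "244,14,3766", "245,14,3807", "246,14,3830", "247,14,3854", "247,14,4151"]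

-- int(track.split(',')[0]); exact here: split(',') always returns a nonempty list (so [0] never
-- raises) and on every element of the fixed list its first field parses as an int, so the
-- `.getD` defaults are never taken.
def pvFirst (track : String) : Int :=
  (PySem.Int.ofStr? ((PySem.List.pyGet? ((PySem.Str.split? track ",").getD []) 0).getD "")).getD 0

-- the for-loop with break: append while distance + 26 >= first coordinate
def pvLoopA (threshold : Int) (now : List String) : List String → List String
  | [] => now
  | t :: ts => if threshold < pvFirst t then now else pvLoopA threshold (now ++ [t]) ts

def generate_track (distance : Int) : List String :=
  pvLoopA (distance + 26) [] pvAllTrack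

-- ===== PORT B =====
-- _track_points: the same data as integer triples
def pvTrackPoints : List (Int × Int × Int) := [(26, 12, 1), (26, 13, 78), (27, 13, 166), (28, 13, 174), (29, 13, 191), (30, 13, 207), (31, 13, 223), (32, 13, 230), (33, 13, 246), (34, 13, 262), (35, 13, 279), (36, 13, 286), (37, 13, 303), (38, 13, 327), (39, 13, 334), (40, 13, 342), (41, 13, 374), (42, 13, 391), (43, 13, 414), (44, 13, 422), (45, 13, 438), (46, 13, 454), (48, 13, 470), (49, 13, 495), (50, 13, 519), (51, 13, 535), (52, 13, 542), (53, 13, 567), (54, 13, 583), (55, 13, 619), (56, 13, 622), (57, 13, 638), (58, 13, 663), (59, 13, 679), (60, 13, 694), (61, 13, 711), (62, 13, 727), (63, 13, 735), (63, 14, 742), (64, 15, 750), (65, 15, 774), (66, 15, 798), (67, 15, 807), (68, 15, 822), (69, 15, 846), (70, 15, 862), (71, 15, 870), (72, 15, 894), (73, 15, 910), (74, 15, 926), (75, 15, 951), (76, 15, 958), (77, 15, 974), (79, 15, 998), (80, 15, 1023), (81, 15, 1054), (82, 15, 1086), (83, 15, 1094), (84, 15, 1126), (85, 16, 1134), (86,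 16, 1166), (87, 16, 1175), (88, 17, 1190), (89, 17, 1214), (90, 17, 1222), (91, 17, 1238), (92, 17, 1263), (94, 18, 1279), (95, 18, 1318), (96, 18, 1336), (97, 19, 1342), (98, 19, 1358), (99, 19, 1374), (100, 19, 1390), (101, 19, 1399), (102, 19, 1414), (103, 19, 1446), (104, 19, 1462), (105, 19, 1470), (106, 19, 1487), (107, 19, 1510), (108, 19, 1518), (109, 19, 1526), (110, 19, 1542), (111, 19, 1558), (112, 19, 1574), (113, 19, 1590), (114, 19, 1607), (115, 20, 1630), (116, 20, 1654), (117, 20, 1662), (118, 20, 1679), (119, 20, 1687), (120, 20, 1694), (121, 20, 1703), (122, 20, 1726), (123, 20, 1734), (124, 20, 1758), (125, 20, 1774), (126, 20, 1790), (127, 20, 1814), (128, 20, 1822), (129, 20, 1838), (131, 20, 1854), (132, 20, 1870), (133, 20, 1886), (134, 20, 1894), (135, 20, 1902), (136, 20, 1934), (137, 20, 1982), (138, 20, 2006), (139, 20, 2015), (140, 20, 2030), (141, 20, 2047), (142, 20, 2054), (143, 20, 2062), (144, 20, 2078), (145, 20, 2086), (146, 20, 2102), (147, 20, 2126), (148,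 20, 2134), (149, 20, 2158), (150, 19, 2174), (151, 19, 2198), (152, 19, 2215), (153, 19, 2222), (154, 19, 2239), (157, 18, 2254), (158, 18, 2278), (160, 17, 2296), (161, 17, 2310), (163, 17, 2326), (164, 17, 2342), (166, 17, 2350), (167, 17, 2358), (168, 17, 2367), (169, 17, 2374), (171, 17, 2383), (171, 16, 2390), (173, 15, 2422), (174, 15, 2471), (175, 15, 2486), (176, 15, 2502), (177, 15, 2510), (178, 15, 2518), (178, 14, 2526), (179, 14, 2534), (180, 14, 2550), (181, 14, 2574), (182, 14, 2590), (183, 14, 2598), (184, 14, 2614), (185, 14, 2622), (186, 14, 2630), (187, 14, 2639), (188, 14, 2646), (190, 14, 2662), (191, 14, 2678), (192, 14, 2686), (193, 14, 2694), (194, 14, 2710), (195, 14, 2734), (197, 14, 2750), (198, 14, 2766), (199, 14, 2776), (200, 14, 2782), (201, 14, 2790), (202, 14, 2798), (204, 14, 2814), (205, 14, 2838), (206, 14, 2854), (207, 14, 2878), (208, 14, 2910), (209, 14, 2934), (211, 14, 2951), (212, 14, 2966), (213, 14, 2990), (214, 14, 3014), (215, 14, 3022), (216, 14, 3055), (217,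 14, 3078), (218, 14, 3110), (219, 14, 3120), (220, 14, 3142), (221, 14, 3174), (222, 14, 3191), (223, 14, 3199), (224, 14, 3214), (225, 14, 3238), (226, 14, 3263), (227, 14, 3271), (228, 14, 3280), (229, 14, 3294), (230, 14, 3319), (231, 14, 3334), (232, 14, 3358), (233, 14, 3422), (234, 14, 3446), (235, 14, 3470), (236, 14, 3486), (237, 14, 3518), (238, 14, 3567), (239, 14, 3574), (240, 14, 3638), (241, 14, 3662), (242, 14, 3702), (243, 14, 3718), (244, 14, 3766), (245, 14, 3807), (246, 14, 3830), (247, 14, 3854), (247, 14, 4151)]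

-- _firsts = [p[0] for p in _track_points]
def pvFirstsB : List Int := pvTrackPoints.map (fun p => p.1)

-- ','.join(map(str, p))
def pvRender (p : Int × Int × Int) : String :=
  PySem.Str.join "," [PySem.Int.toStr p.1, PySem.Int.toStr p.2.1, PySem.Int.toStr p.2.2]

-- idx = bisect.bisect_right(_firsts, distance + 26); render _track_points[:idx]
def generate_track_alt (distance : Int) : List String :=
  (pvTrackPoints.take (PySem.List.bisectRight pvFirstsB (distance + 26))).map pvRender

-- ===== PRECONDITION & SPEC =====
def Spec_generate_track (distance : Int) (out : List String) : Prop := out = generate_track_alt distance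
instance (distance : Int) (out : List String) : Decidable (Spec_generate_track distance out) := by unfold Spec_generate_track; infer_instance

-- ===== CLAIM =====
def Claim_equal_generate_track : Prop := ∀ (distance : Int), Dom_generate_track distance → Spec_generate_track distance (generate_track distance)

-- ===== LEMMAS AND PROOFS =====

-- A's loop is takeWhile of the inclusive threshold test, appended to the accumulator
lemma pvLoopA_eq_takeWhile (x : Int) (l acc : List String) :
    pvLoopA x acc l = acc ++ l.takeWhile (fun t => decide (pvFirst t ≤ x)) := by
  induction l generalizing acc with
  | nil => simp [pvLoopA]
  | cons t ts ih =>
    simp only [pvLoopA, List.takeWhile_cons]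
    by_cases h : x < pvFirst t
    · simp [h, not_le.mpr h]
    · simp [h, not_lt.mp h, ih]

-- the first-index characterisation of takeWhile's length
lemma pvTakeWhile_spec {α : Type} (p : α → Bool) (l : List α) :
    (∀ i (hi : i < l.length), i < (l.takeWhile p).length → p l[i] = true) ∧
    (∀ h : (l.takeWhile p).length < l.length, p (l[(l.takeWhile p).length]) = false) := by
  induction l with
  | nil => simp
  | cons a l ih =>
    by_cases hpa : p a
    · refine ⟨fun i hi hlt => ?_, fun h => ?_⟩
      · cases i with
        | zero => simpa using hpa
        | succ n =>
          simp only [List.takeWhile_cons, hpa, if_true, List.length_cons] at hlt hi ⊢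
          exact ih.1 n (by omega) (by omega)
      · simp only [List.takeWhile_cons, hpa, if_true, List.length_cons] at h ⊢
        exact ih.2 (by omega)
    · simp only [Bool.not_eq_true] at hpa
      refine ⟨fun i hi hlt => ?_, fun h => ?_⟩
      · simp [hpa] at hlt
      · simp [hpa]

-- rendering the numeric table reproduces A's string literals
set_option maxRecDepth 40000 in
lemma pvRender_table : pvTrackPoints.map pvRender = pvAllTrack := by decide

-- B's precomputed firsts are A's parsed first fields
set_option maxRecDepth 40000 in
lemma pvFirstsB_eq : pvFirstsB = pvAllTrack.map pvFirst := by decide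

set_option maxRecDepth 40000 in
lemma pvMain (x : Int) :
    pvLoopA x [] pvAllTrack =
      (pvTrackPoints.take (PySem.List.bisectRight pvFirstsB x)).map pvRender := by
  rw [pvLoopA_eq_takeWhile, List.nil_append, List.map_take, pvRender_table, pvFirstsB_eq]
  set pvFirsts := pvAllTrack.map pvFirst with hF
  have hsorted : List.Pairwise (fun a b : Int => a ≤ b) pvFirsts := by rw [hF]; decide
  obtain ⟨hk_le, hk_lo, hk_hi⟩ := PySem.List.bisectRight_spec pvFirsts x hsorted
  have hlen : pvFirsts.length = pvAllTrack.length := by rw [hF]; exact List.length_map ..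
  set p : String → Bool := fun t => decide (pvFirst t ≤ x) with hp
  obtain ⟨hj_lo, hj_hi⟩ := pvTakeWhile_spec p pvAllTrack
  have hj_le : (pvAllTrack.takeWhile p).length ≤ pvAllTrack.length :=
    (List.takeWhile_prefix p).length_le
  set k := PySem.List.bisectRight pvFirsts x with hk
  set j := (pvAllTrack.takeWhile p).length with hj
  have hget : ∀ i (hi : i < pvAllTrack.length),
      pvFirsts[i]'(by omega) = pvFirst (pvAllTrack[i]) := by
    intro i hi; simp [hF]
  have hjk : j = k := by
    rcases lt_trichotomy j k with h | h | h
    · exfalso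
      have hjlen : j < pvAllTrack.length := by omega
      have h1 := hj_hi hjlen
      have h2 := hk_lo j (by omega) h
      rw [hget j hjlen] at h2
      simp [hp] at h1
      omega
    · exact h
    · exfalso
      have hklen : k < pvAllTrack.length := by omega
      have h1 := hj_lo k hklen h
      have h2 := hk_hi k (by omega) (le_refl k)
      rw [hget k hklen] at h2
      simp [hp] at h1
      omega
  rw [← hjk, hj]
  exact (List.prefix_iff_eq_take.mp (List.takeWhile_prefix p))

-- ===== VERDICT =====
theorem generate_track_spec : Claim_equal_generate_track := by
  intro distance _
  unfold Spec_generate_track generate_track generate_track_alt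
  exact pvMain (distance + 26)
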